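-- pv_equiv track=rewrite | github.com/TanKimzeg/BACF | _graph_construction/multi.py | transverse
-- ===== SOURCE A (Python) =====
-- from collections import defaultdict,Counter
--
-- def transverse(address_tx:dict) -> tuple:
--     txset = list(address_tx.values())
--     once_txs = [item for item,count in Counter(txset)
--                 .items() if count == 1]
--     more_txs = set(txset) - set(once_txs)
--     more_txs_addrs = defaultdict(list)
--     once_txs_addrs = defaultdict(list)
--     for addr, tx in address_tx.items():
--         if tx in more_txs:
--             more_txs_addrs[tx].append(addr)
--         else:
--             once_txs_addrs[tx].append(addr)
--     return more_txs_addrs,once_txs_addrs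
-- ===== SOURCE B (Python) =====
-- from collections import defaultdict
--
-- def transverse(address_tx: dict) -> tuple:
--     all_groups = defaultdict(list)
--     for addr, tx in address_tx.items():
--         all_groups[tx].append(addr)
--     more_txs_addrs = defaultdict(list)
--     once_txs_addrs = defaultdict(list)
--     for tx, addrs in all_groups.items():
--         if len(addrs) > 1:
--             more_txs_addrs[tx] = addrs
--         else:
--             once_txs_addrs[tx] = addrs
--     return more_txs_addrs, once_txs_addrs
-- ===== Notes on version B (the rewrite author's own statement) =====
-- stated objective: simpler
-- what changed: One group-by pass building addresses-per-tx, then a partition of the groups by length, replacing A's Counter, list comprehension, set difference and per-pair set-membership loop.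
import Mathlib
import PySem

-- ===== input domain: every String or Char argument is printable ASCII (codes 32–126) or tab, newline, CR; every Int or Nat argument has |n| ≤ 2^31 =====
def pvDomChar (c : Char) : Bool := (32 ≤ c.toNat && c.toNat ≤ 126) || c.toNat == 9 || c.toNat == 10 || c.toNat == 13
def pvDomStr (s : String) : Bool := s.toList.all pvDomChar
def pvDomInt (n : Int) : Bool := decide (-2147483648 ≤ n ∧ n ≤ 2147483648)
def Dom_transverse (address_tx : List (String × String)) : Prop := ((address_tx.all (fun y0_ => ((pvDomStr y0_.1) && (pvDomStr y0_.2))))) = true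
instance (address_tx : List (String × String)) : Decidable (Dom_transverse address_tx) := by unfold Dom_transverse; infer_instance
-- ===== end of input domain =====

-- B replaces A's Counter + set-difference + membership loop by one group-by pass and a
-- partition of the groups by length (simpler decomposition; return value only).

-- ===== PORT A =====
def transverse (address_tx : List (String × String)) : (List (String × List String)) × (List (String × List String)) :=
  let txset : List String := address_tx.map (fun p => p.2)
  let once_txs : List String :=
    ((PySem.Dict.counter txset).items.filter (fun it => it.2 == 1)).map (fun it => it.1)
  let more_txs : PySem.Set String :=
    PySem.Set.diff (PySem.Set.ofList txset) (PySem.Set.ofList once_txs)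
  let res := address_tx.foldl
    (fun (acc : PySem.Dict String (List String) × PySem.Dict String (List String)) p =>
      if PySem.Set.contains more_txs p.2 then
        (acc.1.modify p.2 [] (fun l => l ++ [p.1]), acc.2)
      else
        (acc.1, acc.2.modify p.2 [] (fun l => l ++ [p.1])))
    (PySem.Dict.empty, PySem.Dict.empty)
  (res.1.items, res.2.items)

-- ===== PORT B =====
def transverse_alt (address_tx : List (String × String)) : (List (String × List String)) × (List (String × List String)) :=
  let all_groups : PySem.Dict String (List String) :=
    address_tx.foldl (fun g p => g.modify p.2 [] (fun l => l ++ [p.1])) PySem.Dict.empty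
  let res := all_groups.items.foldl
    (fun (acc : PySem.Dict String (List String) × PySem.Dict String (List String)) it =>
      if 1 < it.2.length then
        (acc.1.insert it.1 it.2, acc.2)
      else
        (acc.1, acc.2.insert it.1 it.2))
    (PySem.Dict.empty, PySem.Dict.empty)
  (res.1.items, res.2.items)

-- ===== PRECONDITION & SPEC =====
def Spec_transverse (address_tx : List (String × String)) (out : (List (String × List String)) × (List (String × List String))) : Prop := out = transverse_alt address_tx
instance (address_tx : List (String × String)) (out : (List (String × List String)) × (List (String × List String))) : Decidable (Spec_transverse address_tx out) := by unfold Spec_transverse; infer_instance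

-- ===== CLAIM (what is proved, stated in full; the proofs are below) =====
def Claim_equal_transverse : Prop := ∀ (address_tx : List (String × String)), Dom_transverse address_tx → Spec_transverse address_tx (transverse address_tx)

-- ===== LEMMAS AND PROOFS =====

lemma filter_foldl_add (c : String → Bool) :
    ∀ (l s : List String), List.filter c (l.foldl PySem.Set.add s) = (l.filter c).foldl PySem.Set.add (s.filter c) := by
  intro l
  induction l with
  | nil => intro s; simp
  | cons x l ih =>
    intro s
    simp only [List.foldl_cons, List.filter_cons]
    rw [ih]
    by_cases hc : c x = true
    · simp only [hc, if_pos, List.foldl_cons]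
      congr 1
      by_cases hx : x ∈ s <;> simp [PySem.Set.add, hx, hc, List.mem_filter, List.filter_append]
    · simp only [hc, if_neg, Bool.false_eq_true, not_false_iff]
      congr 1
      by_cases hx : x ∈ s <;> simp [PySem.Set.add, hx, hc, List.filter_append]

lemma ofList_filter (c : String → Bool) (l : List String) :
    PySem.Set.ofList (l.filter c) = (PySem.Set.ofList l).filter c := by
  simpa using (filter_foldl_add c l []).symm

def stepD (g : PySem.Dict String (List String)) (p : String × String) : PySem.Dict String (List String) :=
  g.modify p.2 [] (fun l => l ++ [p.1])

lemma keys_G (xs : List (String × String)) :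
    (xs.foldl stepD PySem.Dict.empty).keys = PySem.Set.ofList (xs.map (fun p => p.2)) := by
  have h := PySem.Dict.keys_foldl_modify_key xs (fun p => p.2) [] (fun _ p => fun l => l ++ [p.1]) PySem.Dict.empty
  simpa [stepD, PySem.Set.ofList, PySem.Set.update, PySem.Dict.keys_empty] using h

lemma nodup_keys_G (xs : List (String × String)) :
    (xs.foldl stepD PySem.Dict.empty).keys.Nodup := by
  have h := PySem.Dict.nodup_keys_foldl_modify_key xs (fun p => p.2) [] (fun _ p => fun l => l ++ [p.1]) PySem.Dict.empty (by simp)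
  simpa [stepD] using h

lemma getD_G (xs : List (String × String)) (k : String) :
    (xs.foldl stepD PySem.Dict.empty).getD k []
      = (xs.filter (fun p => p.2 == k)).map (fun p => p.1) := by
  have hswap : xs.foldl stepD PySem.Dict.empty
      = (xs.map (fun p => (p.2, p.1))).foldl (fun d p => d.modify p.1 [] (fun x => x ++ [p.2])) PySem.Dict.empty := by
    rw [List.foldl_map]
    rfl
  rw [hswap, PySem.Dict.getD_foldl_modify_append, List.filter_map]
  simp [Function.comp_def]

lemma items_G (xs : List (String × String)) :
    (xs.foldl stepD PySem.Dict.empty).items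
      = (PySem.Set.ofList (xs.map (fun p => p.2))).map
          (fun k => (k, (xs.filter (fun p => p.2 == k)).map (fun p => p.1))) := by
  rw [PySem.Dict.items_eq_map_keys _ (nodup_keys_G xs) [], keys_G]
  exact List.map_congr_left (fun k _ => by rw [getD_G])

lemma items_filtered_fold (xs : List (String × String)) (c : String → Bool) :
    ((xs.filter (fun p => c p.2)).foldl stepD PySem.Dict.empty).items
      = ((xs.foldl stepD PySem.Dict.empty).items).filter (fun it => c it.1) := by
  rw [items_G, items_G, List.filter_map]
  have hkeys : PySem.Set.ofList ((xs.filter (fun p => c p.2)).map (fun p => p.2))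
      = (PySem.Set.ofList (xs.map (fun p => p.2))).filter c := by
    rw [← ofList_filter]
    congr 1
    rw [List.filter_map]
    rfl
  rw [hkeys]
  have hcomp : ((fun it => c it.1) ∘ (fun k => (k, (xs.filter (fun p => p.2 == k)).map (fun p => p.1)))) = c := rfl
  rw [hcomp]
  apply List.map_congr_left
  intro k hk
  have hck : c k = true := (List.mem_filter.mp hk).2
  congr 1
  rw [List.filter_filter]
  congr 1
  apply List.filter_congr
  intro p _
  by_cases h2 : p.2 = k
  · simp [h2, hck]
  · simp [h2]


lemma items_insert_fold (l : List (String × List String)) (h : (l.map (fun it => it.1)).Nodup) :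
    (l.foldl (fun d it => d.insert it.1 it.2) PySem.Dict.empty).items = l := by
  have := PySem.Dict.items_foldl_insert_fresh l (fun it => it.1) (fun it => it.2) PySem.Dict.empty
    (fun a _ => by simp [PySem.Dict.contains_empty]) h
  simpa using this

lemma once_mem (txset : List String) (y : String) :
    y ∈ ((PySem.Dict.counter txset).items.filter (fun it => it.2 == 1)).map (fun it => it.1)
      ↔ (y ∈ txset ∧ txset.count y = 1) := by
  rw [PySem.Dict.items_counter]
  simp [List.mem_filter, PySem.Set.mem_ofList]

lemma cond_eq (txset : List String) (k : String) (hk : k ∈ txset) :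
    PySem.Set.contains
      (PySem.Set.diff (PySem.Set.ofList txset)
        (PySem.Set.ofList (((PySem.Dict.counter txset).items.filter (fun it => it.2 == 1)).map (fun it => it.1)))) k
    = decide (1 < txset.count k) := by
  have hmem : PySem.Set.contains
      (PySem.Set.diff (PySem.Set.ofList txset)
        (PySem.Set.ofList (((PySem.Dict.counter txset).items.filter (fun it => it.2 == 1)).map (fun it => it.1)))) k = true
      ↔ (k ∈ txset ∧ ¬ txset.count k = 1) := by
    simp [PySem.Set.contains, PySem.Set.diff, List.mem_filter,
      PySem.Set.mem_ofList, once_mem, hk]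
  have hpos : 0 < txset.count k := List.count_pos_iff.mpr hk
  by_cases h : 1 < txset.count k
  · simp only [h, decide_true]
    exact hmem.mpr ⟨hk, by omega⟩
  · simp only [h, decide_false]
    rw [Bool.eq_false_iff]
    intro hc
    have := (hmem.mp hc).2
    omega

lemma splitA (more : PySem.Set String) :
    ∀ (xs : List (String × String)) (d1 d2 : PySem.Dict String (List String)),
    xs.foldl (fun acc p =>
        if PySem.Set.contains more p.2 then
          (acc.1.modify p.2 [] (fun l => l ++ [p.1]), acc.2)
        else
          (acc.1, acc.2.modify p.2 [] (fun l => l ++ [p.1]))) (d1, d2)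
      = ((xs.filter (fun p => PySem.Set.contains more p.2)).foldl stepD d1,
         (xs.filter (fun p => !PySem.Set.contains more p.2)).foldl stepD d2) := by
  intro xs
  induction xs with
  | nil => intro d1 d2; simp
  | cons x l ih =>
    intro d1 d2
    by_cases h : PySem.Set.contains more x.2 = true
    · have h' := h
      simp only [List.foldl_cons, List.filter_cons, h', Bool.not_true, if_true,
        Bool.false_eq_true, if_false, ih, stepD]
    · have h' : PySem.Set.contains more x.2 = false := Bool.eq_false_iff.mpr h
      simp only [List.foldl_cons, List.filter_cons, h', Bool.not_false, if_true,
        Bool.false_eq_true, if_false, ih, stepD]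

lemma splitB :
    ∀ (l : List (String × List String)) (d1 d2 : PySem.Dict String (List String)),
    l.foldl (fun acc it =>
        if 1 < it.2.length then
          (acc.1.insert it.1 it.2, acc.2)
        else
          (acc.1, acc.2.insert it.1 it.2)) (d1, d2)
      = ((l.filter (fun it => decide (1 < it.2.length))).foldl (fun d it => d.insert it.1 it.2) d1,
         (l.filter (fun it => !decide (1 < it.2.length))).foldl (fun d it => d.insert it.1 it.2) d2) := by
  intro l
  induction l with
  | nil => intro d1 d2; simp
  | cons x l ih =>
    intro d1 d2
    by_cases h : 1 < x.2.length <;> simp [h, ih]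


theorem transverse_eq (xs : List (String × String)) : transverse xs = transverse_alt xs := by
  unfold transverse transverse_alt
  simp only []
  rw [splitA, splitB]
  have hGfold : xs.foldl (fun g p => g.modify p.2 [] (fun l => l ++ [p.1])) PySem.Dict.empty
      = xs.foldl stepD PySem.Dict.empty := rfl
  rw [hGfold]
  set M : PySem.Set String :=
    PySem.Set.diff (PySem.Set.ofList (xs.map (fun p => p.2)))
      (PySem.Set.ofList (((PySem.Dict.counter (xs.map (fun p => p.2))).items.filter
        (fun it => it.2 == 1)).map (fun it => it.1))) with hM
  have hnodupB : ∀ (c : (String × List String) → Bool),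
      (((xs.foldl stepD PySem.Dict.empty).items.filter c).map (fun it => it.1)).Nodup := by
    intro c
    have hsub := List.Sublist.map (fun it : String × List String => it.1)
      (List.filter_sublist (p := c) (l := (xs.foldl stepD PySem.Dict.empty).items))
    have hkeys : (xs.foldl stepD PySem.Dict.empty).items.map (fun it => it.1)
        = (xs.foldl stepD PySem.Dict.empty).keys := rfl
    exact List.Nodup.sublist hsub (hkeys ▸ nodup_keys_G xs)
  rw [items_insert_fold _ (hnodupB _), items_insert_fold _ (hnodupB _)]
  rw [items_filtered_fold xs (fun t => PySem.Set.contains M t),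
    items_filtered_fold xs (fun t => !PySem.Set.contains M t)]
  have hpt : ∀ it ∈ (xs.foldl stepD PySem.Dict.empty).items,
      PySem.Set.contains M it.1 = decide (1 < it.2.length) := by
    intro it hit
    rw [items_G] at hit
    obtain ⟨k, hkS, rfl⟩ := List.mem_map.mp hit
    have hk : k ∈ xs.map (fun p => p.2) := (PySem.Set.mem_ofList _ _).mp hkS
    have hlen : ((xs.filter (fun p => p.2 == k)).map (fun p => p.1)).length
        = (xs.map (fun p => p.2)).count k := by
      rw [List.length_map, ← List.countP_eq_length_filter, List.count_eq_countP, List.countP_map]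
      rfl
    rw [hM, cond_eq _ _ hk]
    simp only [hlen]
  have e1 := List.filter_congr (l := (xs.foldl stepD PySem.Dict.empty).items)
      (p := fun it => PySem.Set.contains M it.1)
      (q := fun it => decide (1 < it.2.length)) hpt
  have e2 := List.filter_congr (l := (xs.foldl stepD PySem.Dict.empty).items)
      (p := fun it => !PySem.Set.contains M it.1)
      (q := fun it => !decide (1 < it.2.length))
      (fun it hit => by show (!PySem.Set.contains M it.1) = !decide (1 < it.2.length); rw [hpt it hit])
  rw [e1, e2]

-- ===== VERDICT (by name: the statement is the Claim_ definition above) =====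
theorem transverse_spec : Claim_equal_transverse := by
  intro xs _
  unfold Spec_transverse
  exact transverse_eq xs
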